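-- pv_equiv track=rewrite | github.com/selcuk-yalcin/agenticAI | projects/customer_support/workflows/support_workflow.py | _calculate_avg_sentiment
-- ===== SOURCE A (Python) =====
-- from typing import Dict, Any, List, Optional
--
-- def _calculate_avg_sentiment(
--
--     ticket_history: List[Dict[str, Any]]
-- ) -> str:
--     """Calculate average sentiment from ticket history."""
--     sentiments = [t.get("response", {}).get("sentiment", "neutral")
--                  for t in ticket_history]
--
--     positive = sentiments.count("positive")
--     negative = sentiments.count("negative")
--
--     if positive > negative:
--         return "positive"
--     elif negative > positive:
--         return "negative"
--     return "neutral"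
-- ===== SOURCE B (Python) =====
-- from typing import Dict, Any, List
--
-- _WEIGHT = {"positive": 1, "negative": -1}
-- _VERDICT = {1: "positive", -1: "negative"}
--
-- def _calculate_avg_sentiment(ticket_history: List[Dict[str, Any]]) -> str:
--     """Calculate average sentiment from ticket history (weighted sum + sign lookup)."""
--     score = sum(_WEIGHT.get(t.get("response", {}).get("sentiment", "neutral"), 0)
--                 for t in ticket_history)
--     sign = (score > 0) - (score < 0)
--     return _VERDICT.get(sign, "neutral")
-- ===== Notes on version B (the rewrite author's own statement) =====
-- stated objective: alternative
-- what changed: Replaces the intermediate sentiments list plus two .count passes and the if/elif chain with a weight-table map, a single summation, and a sign-table lookup for the verdict.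
import Mathlib
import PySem

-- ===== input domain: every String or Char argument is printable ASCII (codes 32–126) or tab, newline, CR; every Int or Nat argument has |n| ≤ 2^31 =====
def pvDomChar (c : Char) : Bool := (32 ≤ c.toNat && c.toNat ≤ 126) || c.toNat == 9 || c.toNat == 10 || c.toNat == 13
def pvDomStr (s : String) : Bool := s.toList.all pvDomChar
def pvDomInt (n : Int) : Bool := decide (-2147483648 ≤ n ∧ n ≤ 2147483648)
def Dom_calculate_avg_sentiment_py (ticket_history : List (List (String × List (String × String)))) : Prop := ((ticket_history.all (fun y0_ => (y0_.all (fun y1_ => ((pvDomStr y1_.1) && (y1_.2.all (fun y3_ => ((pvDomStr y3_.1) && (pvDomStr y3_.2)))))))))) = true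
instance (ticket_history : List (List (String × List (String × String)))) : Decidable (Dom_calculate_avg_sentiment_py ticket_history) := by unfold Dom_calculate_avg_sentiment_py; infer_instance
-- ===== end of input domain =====

-- B replaces the list build + two .count passes + if/elif chain with a weighted map-sum and table lookups; same value everywhere.

-- ===== PORT A =====
-- dict.get(k, dflt) on an association list: first match, else the default (exact for Python's dict.get)
def pyDictGetD {τ : Type} (l : List (String × τ)) (k : String) (dflt : τ) : τ :=
  match l.find? (fun p => p.1 == k) with
  | some p => p.2
  | none => dflt

-- t.get("response", {}).get("sentiment", "neutral")
def sentimentOfA (t : List (String × List (String × String))) : String :=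
  pyDictGetD (pyDictGetD t "response" []) "sentiment" "neutral"

def calculate_avg_sentiment_py (ticket_history : List (List (String × List (String × String)))) : String :=
  let sentiments := ticket_history.map sentimentOfA
  let positive := sentiments.count "positive"
  let negative := sentiments.count "negative"
  if positive > negative then "positive"
  else if negative > positive then "negative"
  else "neutral"

-- ===== PORT B =====
-- _WEIGHT.get(s, 0)
def pvWeight (s : String) : Int :=
  (PySem.Dict.ofList [("positive", (1 : Int)), ("negative", (-1 : Int))]).getD s 0

def calculate_avg_sentiment_py_alt (ticket_history : List (List (String × List (String × String)))) : String :=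
  let score : Int := (ticket_history.map (fun t =>
      pvWeight ((PySem.Dict.mk ((PySem.Dict.mk t).getD "response" [])).getD "sentiment" "neutral"))).sum
  let sign : Int := (if score > 0 then (1 : Int) else 0) - (if score < 0 then (1 : Int) else 0)
  (PySem.Dict.ofList [((1 : Int), "positive"), ((-1 : Int), "negative")]).getD sign "neutral"

-- ===== PRECONDITION & SPEC =====
def Spec_calculate_avg_sentiment_py (ticket_history : List (List (String × List (String × String)))) (out : String) : Prop := out = calculate_avg_sentiment_py_alt ticket_history
instance (ticket_history : List (List (String × List (String × String)))) (out : String) : Decidable (Spec_calculate_avg_sentiment_py ticket_history out) := by unfold Spec_calculate_avg_sentiment_py; infer_instance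

-- ===== CLAIM (what is proved, stated in full; the proofs are below) =====
def Claim_equal_calculate_avg_sentiment_py : Prop := ∀ (ticket_history : List (List (String × List (String × String)))), Dom_calculate_avg_sentiment_py ticket_history → Spec_calculate_avg_sentiment_py ticket_history (calculate_avg_sentiment_py ticket_history)

-- ===== LEMMAS AND PROOFS =====

theorem dictGetD_eq_pyDictGetD {τ : Type} (l : List (String × τ)) (k : String) (d : τ) :
    (PySem.Dict.mk l).getD k d = pyDictGetD l k d := by
  simp only [PySem.Dict.getD, PySem.Dict.get?, pyDictGetD]
  cases List.find? (fun p => p.1 == k) l <;> simp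

theorem getD_eq (t : List (String × List (String × String))) :
    (PySem.Dict.mk ((PySem.Dict.mk t).getD "response" [])).getD "sentiment" "neutral"
      = sentimentOfA t := by
  rw [dictGetD_eq_pyDictGetD, dictGetD_eq_pyDictGetD]; rfl

theorem pvWeight_eq (s : String) :
    pvWeight s = if s = "positive" then 1 else if s = "negative" then -1 else 0 := by
  have h : PySem.Dict.ofList [("positive", (1 : Int)), ("negative", (-1 : Int))]
      = PySem.Dict.mk [("positive", (1 : Int)), ("negative", (-1 : Int))] := rfl
  by_cases hp : s = "positive"
  · simp [pvWeight, h, hp, PySem.Dict.getD, PySem.Dict.get?]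
  · by_cases hn : s = "negative"
    · simp [pvWeight, h, hn, PySem.Dict.getD, PySem.Dict.get?]
    · simp [pvWeight, h, hp, hn, PySem.Dict.getD, PySem.Dict.get?,
        Ne.symm hp, Ne.symm hn]

theorem pvVerdict_eq (n : Int) :
    (PySem.Dict.ofList [((1 : Int), "positive"), ((-1 : Int), "negative")]).getD n "neutral"
      = if n = 1 then "positive" else if n = -1 then "negative" else "neutral" := by
  have h : PySem.Dict.ofList [((1 : Int), "positive"), ((-1 : Int), "negative")]
      = PySem.Dict.mk [((1 : Int), "positive"), ((-1 : Int), "negative")] := rfl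
  by_cases h1 : n = 1
  · simp [h, h1, PySem.Dict.getD, PySem.Dict.get?]
  · by_cases h2 : n = -1
    · simp [h, h2, PySem.Dict.getD, PySem.Dict.get?]
    · simp [h, h1, h2, PySem.Dict.getD, PySem.Dict.get?, Ne.symm h1, Ne.symm h2]

theorem sum_if_eq_counts (l : List (List (String × List (String × String)))) :
    (l.map (fun t =>
      if sentimentOfA t = "positive" then (1 : Int)
      else if sentimentOfA t = "negative" then -1 else 0)).sum
    = ((l.map sentimentOfA).count "positive" : Int)
      - ((l.map sentimentOfA).count "negative" : Int) := by
  induction l with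
  | nil => simp
  | cons t ts ih =>
    simp only [List.map_cons, List.sum_cons, List.count_cons, ih]
    by_cases hp : sentimentOfA t = "positive"
    · simp [hp]; omega
    · by_cases hn : sentimentOfA t = "negative"
      · simp [hn]; omega
      · simp [hp, hn]

theorem sum_eq_counts (l : List (List (String × List (String × String)))) :
    (l.map (fun t =>
      pvWeight ((PySem.Dict.mk ((PySem.Dict.mk t).getD "response" [])).getD "sentiment" "neutral"))).sum
    = ((l.map sentimentOfA).count "positive" : Int)
      - ((l.map sentimentOfA).count "negative" : Int) := by
  rw [show (fun t =>
      pvWeight ((PySem.Dict.mk ((PySem.Dict.mk t).getD "response" [])).getD "sentiment" "neutral"))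
      = (fun t =>
      if sentimentOfA t = "positive" then (1 : Int)
      else if sentimentOfA t = "negative" then -1 else 0) from
    funext fun t => by rw [getD_eq, pvWeight_eq]]
  exact sum_if_eq_counts l

-- ===== VERDICT (by name: the statement is the Claim_ definition above) =====
theorem calculate_avg_sentiment_py_spec : Claim_equal_calculate_avg_sentiment_py := by
  intro l _
  unfold Spec_calculate_avg_sentiment_py calculate_avg_sentiment_py calculate_avg_sentiment_py_alt
  simp only [sum_eq_counts, pvVerdict_eq]
  set p := (l.map sentimentOfA).count "positive" with hp
  set n := (l.map sentimentOfA).count "negative" with hn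
  rcases lt_trichotomy p n with h | h | h
  · have c1 : ¬ ((p : Int) - n > 0) := by omega
    have c2 : ((p : Int) - n < 0) := by omega
    have hA : ¬ p > n := by omega
    have hB : n > p := h
    simp [c2, hA, hB]
  · have c1 : ¬ ((p : Int) - n > 0) := by omega
    have c2 : ¬ ((p : Int) - n < 0) := by omega
    have hA : ¬ p > n := by omega
    have hB : ¬ n > p := by omega
    simp [c2, hA, hB]
  · have c1 : ((p : Int) - n > 0) := by omega
    have c2 : ¬ ((p : Int) - n < 0) := by omega
    have hA : p > n := h
    have hB : ¬ p < n := by omega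
    simp [c2, hA]
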